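-- pv_equiv track=rewrite | github.com/kodkupa/kodkupa.github.io | tasks/2024/round1_pp/areaunderpath-pp.py | dp
-- ===== SOURCE A (Python) =====
-- lp = 10**9+7
--
-- def dp(n, m, p, r):
--     memory = [[[0]*p for j in range(m+1)] for i in range(n+1)]
--     for i in range(n+1):
--         memory[i][0][0] = 1
--     for j in range(m+1):
--         memory[0][j][0] = 1
--     for i in range(1, n+1):
--         for j in range(1, m+1):
--             for R in range(p):
--                 memory[i][j][R] = (memory[i][j-1][R] +
--                                    memory[i-1][j][(R-j) % p]) % lp
--     return memory[n][m][r]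
-- ===== SOURCE B (Python) =====
-- lp = 10**9+7
--
-- def _add(a, b):
--     # pointwise sum mod lp; the longer list's tail is kept as is
--     if len(a) < len(b):
--         a, b = b, a
--     return [(x + y) % lp for x, y in zip(a, b)] + a[len(b):]
--
-- def dp(n, m, p, r):
--     # Exact-area spectrum: poly[j] is the coefficient list (mod lp) of the
--     # area generating polynomial of paths in the current i x j box; the
--     # residue dimension is gone, p is only used in the final bucketing pass.
--     poly = [[1] for _ in range(m + 1)]
--     for _ in range(n):
--         new = [[1]]
--         for j in range(1, m + 1):
--             new.append(_add(new[j - 1], [0] * j + poly[j]))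
--         poly = new
--     # separate final pass: fold exact areas into p residue buckets
--     buckets = [0] * p
--     for e, c in enumerate(poly[m]):
--         buckets[e % p] = (buckets[e % p] + c) % lp
--     return buckets[r]
-- ===== Notes on version B (the rewrite author's own statement) =====
-- stated objective: alternative
-- what changed: Removes the residue dimension entirely: B tracks the exact area spectrum (polynomial coefficient lists mod lp, shifted by list concatenation and added pointwise) and only in a separate final pass folds the exact-area counts into p residue buckets by exponent mod p, returning bucket r; A threads (R-j)%p indexing through a 3-D residue table.
import Mathlib
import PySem

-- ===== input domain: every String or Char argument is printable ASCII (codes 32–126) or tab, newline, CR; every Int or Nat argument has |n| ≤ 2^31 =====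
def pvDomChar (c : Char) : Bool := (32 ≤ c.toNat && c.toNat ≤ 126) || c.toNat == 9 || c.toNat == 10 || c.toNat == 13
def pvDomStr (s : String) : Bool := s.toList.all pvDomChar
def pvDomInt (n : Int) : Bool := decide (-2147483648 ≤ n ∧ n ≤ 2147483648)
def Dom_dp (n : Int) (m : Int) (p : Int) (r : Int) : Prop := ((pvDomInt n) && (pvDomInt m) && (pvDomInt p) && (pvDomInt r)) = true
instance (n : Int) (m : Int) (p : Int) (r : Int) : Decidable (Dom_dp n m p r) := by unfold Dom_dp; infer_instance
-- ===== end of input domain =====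

-- B drops A's residue dimension: it carries exact-area coefficient lists (mod lp)
-- through the grid and folds them into p residue buckets in one separate final
-- pass (objective: alternative; not faster).

-- ===== PORT A =====
-- A-side helpers: read / functional write of memory[i][j][R] (Python indices, negative wrap)
def pvGetRow (mem : List (List (List Int))) (i : Int) : List (List Int) :=
  PySem.List.pyGetD mem i []

def pvGetCell (mem : List (List (List Int))) (i j : Int) : List Int :=
  PySem.List.pyGetD (pvGetRow mem i) j []

def pvEl (mem : List (List (List Int))) (i j R : Int) : Int :=
  PySem.List.pyGetD (pvGetCell mem i j) R 0

def pvSet (mem : List (List (List Int))) (i j R : Int) (v : Int) : List (List (List Int)) :=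
  PySem.List.pySetD mem i (PySem.List.pySetD (pvGetRow mem i) j (PySem.List.pySetD (pvGetCell mem i j) R v))

def dp (n : Int) (m : Int) (p : Int) (r : Int) : Int :=
  let mem0 := (PySem.List.pyRange 0 (n+1) 1).map (fun _ =>
    (PySem.List.pyRange 0 (m+1) 1).map (fun _ => PySem.List.pyRepeat [(0 : Int)] p))
  let mem1 := (PySem.List.pyRange 0 (n+1) 1).foldl (fun mem i => pvSet mem i 0 0 1) mem0
  let mem2 := (PySem.List.pyRange 0 (m+1) 1).foldl (fun mem j => pvSet mem 0 j 0 1) mem1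
  let mem3 := (PySem.List.pyRange 1 (n+1) 1).foldl (fun mem i =>
    (PySem.List.pyRange 1 (m+1) 1).foldl (fun mem j =>
      (PySem.List.pyRange 0 p 1).foldl (fun mem R =>
        pvSet mem i j R (PySem.Int.mod
          (pvEl mem i (j-1) R + pvEl mem (i-1) j (PySem.Int.mod (R - j) p)) 1000000007)) mem) mem) mem2
  pvEl mem3 n m r

-- ===== PORT B =====
-- B-side helper: _add(a, b) — pointwise sum mod lp, longer tail kept
def pvAdd (a0 b0 : List Int) : List Int :=
  let ab := if a0.length < b0.length then (b0, a0) else (a0, b0)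
  (List.zipWith (fun x y => PySem.Int.mod (x + y) 1000000007) ab.1 ab.2) ++
    PySem.List.slice ab.1 (some (ab.2.length : Int)) none

def dp_alt (n : Int) (m : Int) (p : Int) (r : Int) : Int :=
  let poly0 := (PySem.List.pyRange 0 (m+1) 1).map (fun _ => [(1:Int)])
  let polyN := (PySem.List.pyRange 0 n 1).foldl (fun poly _ =>
      (PySem.List.pyRange 1 (m+1) 1).foldl (fun new j =>
        new ++ [pvAdd (PySem.List.pyGetD new (j-1) [])
                      (PySem.List.pyRepeat [(0:Int)] j ++ PySem.List.pyGetD poly j [])])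
        [[(1:Int)]]) poly0
  let buckets := (PySem.List.enumerate (PySem.List.pyGetD polyN m []) 0).foldl
      (fun buckets ec =>
        PySem.List.pySetD buckets (PySem.Int.mod ec.1 p)
          (PySem.Int.mod (PySem.List.pyGetD buckets (PySem.Int.mod ec.1 p) 0 + ec.2) 1000000007))
      (PySem.List.pyRepeat [(0:Int)] p)
  PySem.List.pyGetD buckets r 0

-- ===== PRECONDITION & SPEC =====
-- Pre_: exactly the inputs on which A returns (otherwise Python raises IndexError:
-- negative dimensions, empty residue lists, or a final index r outside [-p, p)).
def Pre_dp (n : Int) (m : Int) (p : Int) (r : Int) : Prop :=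
  0 ≤ n ∧ 0 ≤ m ∧ 1 ≤ p ∧ -p ≤ r ∧ r < p
instance (n : Int) (m : Int) (p : Int) (r : Int) : Decidable (Pre_dp n m p r) := by
  unfold Pre_dp; infer_instance

def pvWitness_dp : Int × Int × Int × Int := (2, 2, 3, 1)

def Spec_dp (n : Int) (m : Int) (p : Int) (r : Int) (out : Int) : Prop := out = dp_alt n m p r
instance (n : Int) (m : Int) (p : Int) (r : Int) (out : Int) : Decidable (Spec_dp n m p r out) := by
  unfold Spec_dp; infer_instance

-- ===== CLAIM (what is proved, stated in full; the proofs are below) =====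
def Claim_equal_dp : Prop := ∀ (n : Int) (m : Int) (p : Int) (r : Int),
  Dom_dp n m p r → Pre_dp n m p r → Spec_dp n m p r (dp n m p r)

-- ===== LEMMAS AND PROOFS =====

-- The common mathematical value shared by both proofs:
-- F p i j R = A's memory[i][j][R] (i, j as Nats, R an Int residue).
def F (p : Int) : Nat → Nat → Int → Int
  | _, 0, R => if R = 0 then 1 else 0
  | 0, _+1, R => if R = 0 then 1 else 0
  | i+1, j+1, R => PySem.Int.mod
      (F p (i+1) j R + F p i (j+1) (PySem.Int.mod (R - ((j : Int)+1)) p)) 1000000007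
  termination_by i j => (i, j)

-- ---------- generic list/table helpers ----------

def elN (mem : List (List (List Int))) (i j R : Nat) : Int :=
  ((mem.getD i []).getD j []).getD R 0

def setN (mem : List (List (List Int))) (i j R : Nat) (v : Int) : List (List (List Int)) :=
  mem.set i ((mem.getD i []).set j (((mem.getD i []).getD j []).set R v))

def ShapeA (N M P : Nat) (mem : List (List (List Int))) : Prop :=
  mem.length = N ∧ ∀ row ∈ mem, row.length = M ∧ ∀ c ∈ row, c.length = P

theorem pvEl_nat (mem : List (List (List Int))) (i j R : Nat) :
    pvEl mem (i : Int) (j : Int) (R : Int) = elN mem i j R := by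
  simp [pvEl, pvGetCell, pvGetRow, elN]

theorem pvSet_nat (mem : List (List (List Int))) (i j R : Nat) (v : Int) :
    pvSet mem (i : Int) (j : Int) (R : Int) v = setN mem i j R v := by
  simp [pvSet, pvGetCell, pvGetRow, setN]

theorem getD_set {α : Type} (l : List α) (i j : Nat) (v d : α) (hi : i < l.length) :
    (l.set i v).getD j d = if j = i then v else l.getD j d := by
  rcases eq_or_ne i j with h | h
  · subst h; simp [List.getD_eq_getElem?_getD, hi]
  · simp [List.getD_eq_getElem?_getD, h, Ne.symm h]

theorem getD_mem_of_lt {α : Type} (l : List α) (i : Nat) (d : α) (h : i < l.length) :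
    l.getD i d ∈ l := by
  rw [List.getD_eq_getElem?_getD, List.getElem?_eq_getElem h]
  exact List.getElem_mem h

theorem rowLen {N M P : Nat} {mem : List (List (List Int))} (h : ShapeA N M P mem)
    (a : Nat) (ha : a < N) : (mem.getD a []).length = M :=
  (h.2 _ (getD_mem_of_lt mem a [] (by rw [h.1]; exact ha))).1

theorem cellLen {N M P : Nat} {mem : List (List (List Int))} (h : ShapeA N M P mem)
    (a b : Nat) (ha : a < N) (hb : b < M) : ((mem.getD a []).getD b []).length = P := by
  have hrow := h.2 _ (getD_mem_of_lt mem a [] (by rw [h.1]; exact ha))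
  exact hrow.2 _ (getD_mem_of_lt _ b [] (by rw [hrow.1]; exact hb))

theorem elN_setN (mem : List (List (List Int))) (a b c : Nat) (v : Int) (i j R : Nat)
    (ha : a < mem.length) (hb : b < (mem.getD a []).length)
    (hc : c < ((mem.getD a []).getD b []).length) :
    elN (setN mem a b c v) i j R = if i = a ∧ j = b ∧ R = c then v else elN mem i j R := by
  unfold elN setN
  rw [getD_set mem a i _ _ ha]
  by_cases hia : i = a
  · subst hia
    rw [if_pos rfl, getD_set _ b j _ _ hb]
    by_cases hjb : j = b
    · subst hjb
      rw [if_pos rfl, getD_set _ c R _ _ hc]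
      by_cases hrc : R = c
      · subst hrc; rw [if_pos rfl, if_pos ⟨rfl, rfl, rfl⟩]
      · rw [if_neg hrc, if_neg (by tauto)]
    · rw [if_neg hjb, if_neg (by tauto)]
  · rw [if_neg hia, if_neg (by tauto)]

theorem shapeA_setN {N M P : Nat} {mem : List (List (List Int))} (h : ShapeA N M P mem)
    (a b c : Nat) (v : Int) (ha : a < N) (hb : b < M) (_hc : c < P) :
    ShapeA N M P (setN mem a b c v) := by
  refine ⟨by simp [setN, h.1], ?_⟩
  intro row hrow
  rcases List.mem_or_eq_of_mem_set hrow with h1 | h2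
  · exact h.2 row h1
  · subst h2
    have hrl := rowLen h a ha
    refine ⟨by rw [List.length_set]; exact hrl, ?_⟩
    intro cl hcl
    rcases List.mem_or_eq_of_mem_set hcl with h3 | h4
    · exact (h.2 _ (getD_mem_of_lt mem a [] (by rw [h.1]; exact ha))).2 cl h3
    · subst h4; rw [List.length_set]; exact cellLen h a b ha hb

-- ---------- mod helpers ----------

theorem modL_eq_emod (a : Int) : PySem.Int.mod a 1000000007 = a % 1000000007 :=
  PySem.Int.mod_eq_emod_of_pos (by norm_num)

theorem modL_addl (a b : Int) :
    PySem.Int.mod (PySem.Int.mod a 1000000007 + b) 1000000007 =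
      PySem.Int.mod (a + b) 1000000007 := by
  simp only [modL_eq_emod]; exact Int.emod_add_emod a 1000000007 b

-- ---------- F facts ----------

theorem F_base (p : Int) (i j : Nat) (R : Int) (h : i = 0 ∨ j = 0) :
    F p i j R = if R = 0 then 1 else 0 := by
  rcases h with h | h
  · subst h; cases j <;> simp [F]
  · subst h; simp [F]

theorem F_succ (p : Int) (i j : Nat) (R : Int) (hi : 1 ≤ i) (hj : 1 ≤ j) :
    F p i j R = PySem.Int.mod
      (F p i (j-1) R + F p (i-1) j (PySem.Int.mod (R - (j : Int)) p)) 1000000007 := by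
  obtain ⟨i', rfl⟩ : ∃ i', i = i' + 1 := ⟨i - 1, by omega⟩
  obtain ⟨j', rfl⟩ : ∃ j', j = j' + 1 := ⟨j - 1, by omega⟩
  simp only [F, Nat.add_sub_cancel]
  norm_num [Nat.cast_add]

-- ---------- A-side: initialization loops ----------

theorem initI (N M P : Nat) (mem : List (List (List Int))) (h : ShapeA (N+1) (M+1) P mem)
    (hP : 1 ≤ P) (K : Nat) (hK : K ≤ N+1) :
    ShapeA (N+1) (M+1) P ((PySem.List.pyRange 0 (K:Int) 1).foldl (fun mem i => pvSet mem i 0 0 1) mem) ∧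
    (∀ i j R, i ≤ N → j ≤ M → R < P →
      elN ((PySem.List.pyRange 0 (K:Int) 1).foldl (fun mem i => pvSet mem i 0 0 1) mem) i j R
        = if i < K ∧ j = 0 ∧ R = 0 then 1 else elN mem i j R) := by
  induction K with
  | zero =>
    simp only [Nat.cast_zero, PySem.List.pyRange_one_eq_nil (le_refl 0), List.foldl_nil]
    exact ⟨h, fun i j R _ _ _ => by simp⟩
  | succ K ih =>
    obtain ⟨hS, hE⟩ := ih (by omega)
    rw [show ((K+1 : Nat) : Int) = (K:Int) + 1 by push_cast; ring,
        PySem.List.pyRange_one_succ_right (by omega), List.foldl_append, List.foldl_cons,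
        List.foldl_nil]
    rw [show pvSet ((PySem.List.pyRange 0 (K:Int) 1).foldl (fun mem i => pvSet mem i 0 0 1) mem) (K:Int) 0 0 1
        = setN ((PySem.List.pyRange 0 (K:Int) 1).foldl (fun mem i => pvSet mem i 0 0 1) mem) K 0 0 1 from by
      simpa using pvSet_nat ((PySem.List.pyRange 0 (K:Int) 1).foldl (fun mem i => pvSet mem i 0 0 1) mem) K 0 0 1]
    refine ⟨shapeA_setN hS K 0 0 1 (by omega) (by omega) (by omega), ?_⟩
    intro i j R hi hj hR
    rw [elN_setN _ K 0 0 1 i j R (by rw [hS.1]; omega)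
          (by rw [rowLen hS K (by omega)]; omega)
          (by rw [cellLen hS K 0 (by omega) (by omega)]; omega),
        hE i j R hi hj hR]
    by_cases h1 : i = K ∧ j = 0 ∧ R = 0
    · rw [if_pos h1, if_pos (by omega)]
    · rw [if_neg h1]
      by_cases h2 : i < K ∧ j = 0 ∧ R = 0
      · rw [if_pos h2, if_pos (by omega)]
      · rw [if_neg h2, if_neg (by omega)]

theorem initJ (N M P : Nat) (mem : List (List (List Int))) (h : ShapeA (N+1) (M+1) P mem)
    (hP : 1 ≤ P) (K : Nat) (hK : K ≤ M+1) :
    ShapeA (N+1) (M+1) P ((PySem.List.pyRange 0 (K:Int) 1).foldl (fun mem j => pvSet mem 0 j 0 1) mem) ∧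
    (∀ i j R, i ≤ N → j ≤ M → R < P →
      elN ((PySem.List.pyRange 0 (K:Int) 1).foldl (fun mem j => pvSet mem 0 j 0 1) mem) i j R
        = if i = 0 ∧ j < K ∧ R = 0 then 1 else elN mem i j R) := by
  induction K with
  | zero =>
    simp only [Nat.cast_zero, PySem.List.pyRange_one_eq_nil (le_refl 0), List.foldl_nil]
    exact ⟨h, fun i j R _ _ _ => by simp⟩
  | succ K ih =>
    obtain ⟨hS, hE⟩ := ih (by omega)
    rw [show ((K+1 : Nat) : Int) = (K:Int) + 1 by push_cast; ring,
        PySem.List.pyRange_one_succ_right (by omega), List.foldl_append, List.foldl_cons,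
        List.foldl_nil]
    rw [show pvSet ((PySem.List.pyRange 0 (K:Int) 1).foldl (fun mem j => pvSet mem 0 j 0 1) mem) 0 (K:Int) 0 1
        = setN ((PySem.List.pyRange 0 (K:Int) 1).foldl (fun mem j => pvSet mem 0 j 0 1) mem) 0 K 0 1 from by
      simpa using pvSet_nat ((PySem.List.pyRange 0 (K:Int) 1).foldl (fun mem j => pvSet mem 0 j 0 1) mem) 0 K 0 1]
    refine ⟨shapeA_setN hS 0 K 0 1 (by omega) (by omega) (by omega), ?_⟩
    intro i j R hi hj hR
    rw [elN_setN _ 0 K 0 1 i j R (by rw [hS.1]; omega)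
          (by rw [rowLen hS 0 (by omega)]; omega)
          (by rw [cellLen hS 0 K (by omega) (by omega)]; omega),
        hE i j R hi hj hR]
    by_cases h1 : i = 0 ∧ j = K ∧ R = 0
    · rw [if_pos h1, if_pos (by omega)]
    · rw [if_neg h1]
      by_cases h2 : i = 0 ∧ j < K ∧ R = 0
      · rw [if_pos h2, if_pos (by omega)]
      · rw [if_neg h2, if_neg (by omega)]

-- ---------- A-side: the main triple loop ----------

def InvC (p : Int) (N M P : Nat) (i j ρ : Nat) (mem : List (List (List Int))) : Prop :=
  ShapeA (N+1) (M+1) P mem ∧ ∀ a b R, a ≤ N → b ≤ M → R < P →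
    elN mem a b R =
      if a < i ∨ b = 0 ∨ (a = i ∧ b < j) ∨ (a = i ∧ b = j ∧ R < ρ) then F p a b (R:Int) else 0

theorem InvC_iff (p : Int) (N M P i j ρ i' j' ρ' : Nat) (mem : List (List (List Int)))
    (h : InvC p N M P i j ρ mem)
    (hiff : ∀ a b R, a ≤ N → b ≤ M → R < P →
      ((a < i ∨ b = 0 ∨ (a = i ∧ b < j) ∨ (a = i ∧ b = j ∧ R < ρ)) ↔
       (a < i' ∨ b = 0 ∨ (a = i' ∧ b < j') ∨ (a = i' ∧ b = j' ∧ R < ρ')))) :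
    InvC p N M P i' j' ρ' mem := by
  refine ⟨h.1, ?_⟩
  intro a b R ha hb hR
  rw [h.2 a b R ha hb hR, if_congr (hiff a b R ha hb hR) rfl rfl]

theorem loopR (N M P : Nat) (i j : Nat) (hi1 : 1 ≤ i) (hiN : i ≤ N) (hj1 : 1 ≤ j) (hjM : j ≤ M)
    (mem : List (List (List Int))) (h : InvC (P:Int) N M P i j 0 mem) (ρ : Nat) (hρ : ρ ≤ P) :
    InvC (P:Int) N M P i j ρ ((PySem.List.pyRange 0 (ρ:Int) 1).foldl
      (fun mem R => pvSet mem (i:Int) (j:Int) R (PySem.Int.mod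
        (pvEl mem (i:Int) ((j:Int)-1) R + pvEl mem ((i:Int)-1) (j:Int)
          (PySem.Int.mod (R - (j:Int)) (P:Int))) 1000000007)) mem) := by
  induction ρ with
  | zero =>
    simpa only [Nat.cast_zero, PySem.List.pyRange_one_eq_nil (le_refl 0), List.foldl_nil] using h
  | succ ρ ih =>
    have hP : 1 ≤ P := by omega
    have hPpos : (0:Int) < (P:Int) := by omega
    obtain ⟨hS, hE⟩ := ih (by omega)
    rw [show ((ρ+1 : Nat) : Int) = (ρ:Int) + 1 by push_cast; ring,
        PySem.List.pyRange_one_succ_right (by omega), List.foldl_append, List.foldl_cons,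
        List.foldl_nil]
    set memρ := (PySem.List.pyRange 0 (ρ:Int) 1).foldl
      (fun mem R => pvSet mem (i:Int) (j:Int) R (PySem.Int.mod
        (pvEl mem (i:Int) ((j:Int)-1) R + pvEl mem ((i:Int)-1) (j:Int)
          (PySem.Int.mod (R - (j:Int)) (P:Int))) 1000000007)) mem with hmem
    have hj' : ((j:Int) - 1) = ((j-1 : Nat) : Int) := by omega
    have hi' : ((i:Int) - 1) = ((i-1 : Nat) : Int) := by omega
    have hx0 : 0 ≤ PySem.Int.mod ((ρ:Int) - (j:Int)) (P:Int) := PySem.Int.mod_nonneg _ hPpos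
    have hxlt : PySem.Int.mod ((ρ:Int) - (j:Int)) (P:Int) < (P:Int) := PySem.Int.mod_lt _ hPpos
    have hxc : PySem.Int.mod ((ρ:Int) - (j:Int)) (P:Int)
        = (((PySem.Int.mod ((ρ:Int) - (j:Int)) (P:Int)).toNat : Nat) : Int) :=
      (Int.toNat_of_nonneg hx0).symm
    have htP : (PySem.Int.mod ((ρ:Int) - (j:Int)) (P:Int)).toNat < P := by omega
    have e1 : pvEl memρ (i:Int) ((j:Int)-1) (ρ:Int) = F (P:Int) i (j-1) (ρ:Int) := by
      rw [hj', pvEl_nat, hE i (j-1) ρ (by omega) (by omega) (by omega), if_pos (by omega)]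
    have e2 : pvEl memρ ((i:Int)-1) (j:Int) (PySem.Int.mod ((ρ:Int) - (j:Int)) (P:Int))
        = F (P:Int) (i-1) j (PySem.Int.mod ((ρ:Int) - (j:Int)) (P:Int)) := by
      conv_lhs => rw [hxc]
      rw [hi', pvEl_nat,
        hE (i-1) j (PySem.Int.mod ((ρ:Int) - (j:Int)) (P:Int)).toNat (by omega) (by omega) htP,
        if_pos (by omega), ← hxc]
    have hv : PySem.Int.mod
        (pvEl memρ (i:Int) ((j:Int)-1) (ρ:Int) + pvEl memρ ((i:Int)-1) (j:Int)
          (PySem.Int.mod ((ρ:Int) - (j:Int)) (P:Int))) 1000000007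
        = F (P:Int) i j (ρ:Int) := by
      rw [e1, e2, ← F_succ (P:Int) i j (ρ:Int) hi1 hj1]
    rw [show pvSet memρ (i:Int) (j:Int) (ρ:Int) (PySem.Int.mod
        (pvEl memρ (i:Int) ((j:Int)-1) (ρ:Int) + pvEl memρ ((i:Int)-1) (j:Int)
          (PySem.Int.mod ((ρ:Int) - (j:Int)) (P:Int))) 1000000007)
        = setN memρ i j ρ (F (P:Int) i j (ρ:Int)) from by
      rw [hv]; exact pvSet_nat memρ i j ρ _]
    refine ⟨shapeA_setN hS i j ρ _ (by omega) (by omega) (by omega), ?_⟩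
    intro a b R ha hb hR
    rw [elN_setN memρ i j ρ _ a b R (by rw [hS.1]; omega)
          (by rw [rowLen hS i (by omega)]; omega)
          (by rw [cellLen hS i j (by omega) (by omega)]; omega)]
    by_cases h1 : a = i ∧ b = j ∧ R = ρ
    · obtain ⟨rfl, rfl, rfl⟩ := h1
      rw [if_pos ⟨rfl, rfl, rfl⟩, if_pos (by omega)]
    · rw [if_neg h1, hE a b R ha hb hR]
      refine if_congr ?_ rfl rfl
      simp only [not_and] at h1
      by_cases h2 : a = i
      · subst h2
        by_cases h3 : b = j
        · subst h3; have := h1 rfl rfl; omega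
        · omega
      · omega

theorem pyGetD_neg_getD (xs : List Int) (k : Nat) (hk : 0 < k) (hl : k ≤ xs.length) :
    PySem.List.pyGetD xs (-(k:Int)) 0 = xs.getD (xs.length - k) 0 := by
  rw [PySem.List.pyGetD_neg_natCast _ _ _ hk hl, List.getD_eq_getElem?_getD,
    List.getElem?_eq_getElem (by omega)]
  rfl

theorem loopJ (N M P : Nat) (i : Nat) (hi1 : 1 ≤ i) (hiN : i ≤ N)
    (mem : List (List (List Int))) (h : InvC (P:Int) N M P i 1 0 mem) (J : Nat) (hJ : J ≤ M) :
    InvC (P:Int) N M P i (J+1) 0 ((PySem.List.pyRange 1 ((J:Int)+1) 1).foldl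
      (fun mem j => (PySem.List.pyRange 0 (P:Int) 1).foldl
        (fun mem R => pvSet mem (i:Int) j R (PySem.Int.mod
          (pvEl mem (i:Int) (j-1) R + pvEl mem ((i:Int)-1) j
            (PySem.Int.mod (R - j) (P:Int))) 1000000007)) mem) mem) := by
  induction J with
  | zero =>
    simpa only [Nat.cast_zero, zero_add, PySem.List.pyRange_one_eq_nil (le_refl 1),
      List.foldl_nil] using h
  | succ J ih =>
    have hprev := ih (by omega)
    rw [show ((J+1 : Nat) : Int) + 1 = ((J:Int)+1) + 1 by push_cast; ring,
        PySem.List.pyRange_one_succ_right (by omega), List.foldl_append, List.foldl_cons,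
        List.foldl_nil,
        show ((J:Int)+1) = ((J+1 : Nat) : Int) by push_cast; ring]
    have hstep := loopR N M P i (J+1) hi1 hiN (by omega) (by omega) _ hprev P (le_refl P)
    exact InvC_iff _ N M P i (J+1) P i (J+2) 0 _ hstep (by intro a b R ha hb hR; omega)

theorem loopI (N M P : Nat) (mem : List (List (List Int)))
    (h : InvC (P:Int) N M P 1 1 0 mem) (I : Nat) (hI : I ≤ N) :
    InvC (P:Int) N M P (I+1) 1 0 ((PySem.List.pyRange 1 ((I:Int)+1) 1).foldl
      (fun mem i => (PySem.List.pyRange 1 ((M:Int)+1) 1).foldl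
        (fun mem j => (PySem.List.pyRange 0 (P:Int) 1).foldl
          (fun mem R => pvSet mem i j R (PySem.Int.mod
            (pvEl mem i (j-1) R + pvEl mem (i-1) j
              (PySem.Int.mod (R - j) (P:Int))) 1000000007)) mem) mem) mem) := by
  induction I with
  | zero =>
    simpa only [Nat.cast_zero, zero_add, PySem.List.pyRange_one_eq_nil (le_refl 1),
      List.foldl_nil] using h
  | succ I ih =>
    have hprev := ih (by omega)
    rw [show ((I+1 : Nat) : Int) + 1 = ((I:Int)+1) + 1 by push_cast; ring,
        PySem.List.pyRange_one_succ_right (show (1:Int) ≤ (I:Int)+1 by omega),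
        List.foldl_append, List.foldl_cons, List.foldl_nil,
        show ((I:Int)+1) = ((I+1 : Nat) : Int) by push_cast; ring]
    have hstep := loopJ N M P (I+1) (by omega) (by omega) _ hprev M (le_refl M)
    exact InvC_iff _ N M P (I+1) (M+1) 0 (I+2) 1 0 _ hstep (by intro a b R ha hb hR; omega)

theorem dpA_eq_F (N M P : Nat) (hP : 1 ≤ P) (r : Int) (hr1 : -(P:Int) ≤ r) (hr2 : r < (P:Int)) :
    dp (N:Int) (M:Int) (P:Int) r = F (P:Int) N M (PySem.Int.mod r (P:Int)) := by
  have hPpos : (0:Int) < (P:Int) := by omega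
  simp only [dp]
  rw [show ((PySem.List.pyRange 0 ((N:Int)+1) 1).map (fun _ =>
        (PySem.List.pyRange 0 ((M:Int)+1) 1).map (fun _ => PySem.List.pyRepeat [(0:Int)] (P:Int))))
      = List.replicate (N+1) (List.replicate (M+1) (List.replicate P (0:Int))) from by
    rw [PySem.List.pyRepeat_singleton]
    rw [List.map_const', List.map_const', PySem.List.length_pyRange_one,
      PySem.List.length_pyRange_one]
    rw [show (((N:Int)+1) - 0).toNat = N+1 from by omega,
      show (((M:Int)+1) - 0).toNat = M+1 from by omega,
      show ((P:Int)).toNat = P from by omega]]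
  have hShape0 : ShapeA (N+1) (M+1) P (List.replicate (N+1) (List.replicate (M+1) (List.replicate P (0:Int)))) := by
    refine ⟨by simp, ?_⟩
    intro row hrow
    rw [List.eq_of_mem_replicate hrow]
    refine ⟨by simp, ?_⟩
    intro c hc
    rw [List.eq_of_mem_replicate hc]; simp
  have getD_repl : ∀ {α : Type} (n i : Nat) (a d : α),
      (List.replicate n a).getD i d = if i < n then a else d := by
    intro α n i a d
    rw [List.getD_eq_getElem?_getD, List.getElem?_replicate]
    split_ifs <;> rfl
  have hel0 : ∀ i j R : Nat, elN (List.replicate (N+1) (List.replicate (M+1) (List.replicate P (0:Int)))) i j R = 0 := by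
    intro i j R
    unfold elN
    rw [getD_repl]
    split_ifs with h1
    · rw [getD_repl]
      split_ifs with h2
      · rw [getD_repl]; split_ifs <;> rfl
      · rfl
    · rfl
  rw [show ((N:Int)+1) = ((N+1 : Nat) : Int) by push_cast; ring,
      show ((M:Int)+1) = ((M+1 : Nat) : Int) by push_cast; ring]
  obtain ⟨hS1, hE1⟩ := initI N M P _ hShape0 hP (N+1) (le_refl _)
  obtain ⟨hS2, hE2⟩ := initJ N M P _ hS1 hP (M+1) (le_refl _)
  have hstart : InvC (P:Int) N M P 1 1 0
      ((PySem.List.pyRange 0 ((M+1 : Nat) : Int) 1).foldl (fun mem j => pvSet mem 0 j 0 1)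
        ((PySem.List.pyRange 0 ((N+1 : Nat) : Int) 1).foldl (fun mem i => pvSet mem i 0 0 1)
          (List.replicate (N+1) (List.replicate (M+1) (List.replicate P (0:Int)))))) := by
    refine ⟨hS2, ?_⟩
    intro a b R ha hb hR
    rw [hE2 a b R ha hb hR, hE1 a b R ha hb hR, hel0 a b R]
    by_cases hr : R = 0
    · subst hr
      by_cases hA : a = 0
      · subst hA
        rw [if_pos ⟨rfl, by omega, rfl⟩, if_pos (by omega), F_base _ _ _ _ (Or.inl rfl)]
        simp
      · by_cases hB : b = 0
        · subst hB
          rw [if_neg (by tauto), if_pos ⟨by omega, rfl, rfl⟩, if_pos (by omega),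
            F_base _ _ _ _ (Or.inr rfl)]
          simp
        · rw [if_neg (by tauto), if_neg (by tauto), if_neg (by omega)]
    · rw [if_neg (by tauto), if_neg (by tauto)]
      by_cases hA : a = 0
      · rw [if_pos (by omega), F_base _ _ _ _ (Or.inl hA), if_neg (by simpa using hr)]
      · by_cases hB : b = 0
        · rw [if_pos (by omega), F_base _ _ _ _ (Or.inr hB), if_neg (by simpa using hr)]
        · rw [if_neg (by omega)]
  rw [show ((N+1 : Nat) : Int) = ((N:Int)+1) by push_cast; ring,
      show ((M+1 : Nat) : Int) = ((M:Int)+1) by push_cast; ring]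
  rw [show ((N+1 : Nat) : Int) = ((N:Int)+1) by push_cast; ring,
      show ((M+1 : Nat) : Int) = ((M:Int)+1) by push_cast; ring] at hstart
  have hfin := loopI N M P _ hstart N (le_refl N)
  set mem3 := (PySem.List.pyRange 1 ((N:Int)+1) 1).foldl
    (fun mem i => (PySem.List.pyRange 1 ((M:Int)+1) 1).foldl
      (fun mem j => (PySem.List.pyRange 0 (P:Int) 1).foldl
        (fun mem R => pvSet mem i j R (PySem.Int.mod
          (pvEl mem i (j-1) R + pvEl mem (i-1) j
            (PySem.Int.mod (R - j) (P:Int))) 1000000007)) mem) mem)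
    ((PySem.List.pyRange 0 ((M:Int)+1) 1).foldl (fun mem j => pvSet mem 0 j 0 1)
      ((PySem.List.pyRange 0 ((N:Int)+1) 1).foldl (fun mem i => pvSet mem i 0 0 1)
        (List.replicate (N+1) (List.replicate (M+1) (List.replicate P (0:Int)))))) with hmem3
  obtain ⟨hS3, hE3⟩ := hfin
  rcases le_or_gt 0 r with hr0 | hr0
  · have hrc : r = ((r.toNat : Nat) : Int) := (Int.toNat_of_nonneg hr0).symm
    have hmod : PySem.Int.mod r (P:Int) = r := by
      rw [PySem.Int.mod_eq_emod_of_pos hPpos]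
      exact Int.emod_eq_of_lt hr0 hr2
    rw [hmod]
    conv_lhs => rw [hrc]
    rw [pvEl_nat, hE3 N M r.toNat (le_refl N) (le_refl M) (by omega), if_pos (by omega), ← hrc]
  · have hk1 : 0 < (-r).toNat := by omega
    have hrk : r = -(((-r).toNat : Nat) : Int) := by omega
    have hcl : ((mem3.getD N []).getD M []).length = P :=
      cellLen hS3 N M (by omega) (by omega)
    have hread : pvEl mem3 (N:Int) (M:Int) r = elN mem3 N M (P - (-r).toNat) := by
      unfold pvEl pvGetCell pvGetRow elN
      rw [PySem.List.pyGetD_natCast, PySem.List.pyGetD_natCast]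
      conv_lhs => rw [hrk]
      rw [pyGetD_neg_getD _ _ hk1 (by omega), hcl]
    have hmod : PySem.Int.mod r (P:Int) = ((P - (-r).toNat : Nat) : Int) := by
      rw [PySem.Int.mod_eq_emod_of_pos hPpos,
        show r % (P:Int) = (r + (P:Int)*1) % (P:Int) from (Int.add_mul_emod_self_left r (P:Int) 1).symm,
        mul_one, Int.emod_eq_of_lt (by omega) (by omega)]
      omega
    rw [hread, hmod, hE3 N M (P - (-r).toNat) (le_refl N) (le_refl M) (by omega),
      if_pos (by omega)]

-- ---------- B-side ----------

-- bucket sum: sum of coefficients of l whose exponent (offset s) is ≡ r mod p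
def bsum (p r : Int) : Int → List Int → Int
  | _, [] => 0
  | s, c :: t => (if PySem.Int.mod s p = r then c else 0) + bsum p r (s+1) t

-- the ideal polynomial table B computes
def Q : Nat → Nat → List Int
  | 0, _ => [1]
  | _+1, 0 => [1]
  | i+1, j+1 => pvAdd (Q (i+1) j) (List.replicate (j+1) 0 ++ Q i (j+1))
  termination_by i j => (i, j)

theorem bsum_append (p r : Int) (a b : List Int) : ∀ s : Int,
    bsum p r s (a ++ b) = bsum p r s a + bsum p r (s + a.length) b := by
  induction a with
  | nil => intro s; simp [bsum]
  | cons c t ih =>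
    intro s
    simp only [List.cons_append, bsum, List.length_cons, ih (s+1)]
    rw [show s + ((t.length + 1 : Nat) : Int) = s + 1 + (t.length : Int) by push_cast; ring]
    ring

theorem bsum_zeros (p r : Int) (j : Nat) (s : Int) :
    bsum p r s (List.replicate j 0) = 0 := by
  induction j generalizing s with
  | zero => simp [bsum]
  | succ j ih => simp [List.replicate_succ, bsum, ih]

theorem bsum_shift (p r : Int) (hp : 0 < p) (hr0 : 0 ≤ r) (hrp : r < p) (d : Int)
    (l : List Int) : ∀ s : Int,
    bsum p r s l = bsum p (PySem.Int.mod (r - d) p) (s - d) l := by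
  induction l with
  | nil => intro s; simp [bsum]
  | cons c t ih =>
    intro s
    simp only [bsum, ih (s+1), show s + 1 - d = s - d + 1 by ring]
    congr 1
    refine if_congr ?_ rfl rfl
    rw [PySem.Int.mod_eq_emod_of_pos hp, PySem.Int.mod_eq_emod_of_pos hp,
      PySem.Int.mod_eq_emod_of_pos hp]
    constructor
    · intro h
      have hs : Int.ModEq p s r := by
        show s % p = r % p
        rw [Int.emod_eq_of_lt hr0 hrp]; exact h
      exact hs.sub_right d
    · intro h
      have h2 : Int.ModEq p (s - d) (r - d) := h
      have h3 := h2.add_right d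
      simp only [sub_add_cancel] at h3
      have h4 : s % p = r % p := h3
      rw [h4, Int.emod_eq_of_lt hr0 hrp]

-- bsum over pvAdd's core shape is congruent mod lp to the sum of the two bsums
theorem bsum_core (p r : Int) (b : List Int) : ∀ (a : List Int) (s : Int),
    b.length ≤ a.length →
    Int.ModEq 1000000007
      (bsum p r s (List.zipWith (fun x y => PySem.Int.mod (x + y) 1000000007) a b ++
        a.drop b.length))
      (bsum p r s a + bsum p r s b) := by
  induction b with
  | nil =>
    intro a s _
    simp [bsum]
  | cons y b' ih =>
    intro a s hlen
    cases a with
    | nil => simp at hlen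
    | cons x a' =>
      simp only [List.zipWith_cons_cons, List.cons_append, bsum]
      have hx : Int.ModEq 1000000007
          (if PySem.Int.mod s p = r then PySem.Int.mod (x + y) 1000000007 else 0)
          ((if PySem.Int.mod s p = r then x else 0) + (if PySem.Int.mod s p = r then y else 0)) := by
        split_ifs with h
        · rw [modL_eq_emod]
          exact Int.emod_emod_of_dvd _ dvd_rfl
        · simp
      have ht := ih a' (s+1) (by simpa using hlen)
      calc (if PySem.Int.mod s p = r then PySem.Int.mod (x + y) 1000000007 else 0) +
              bsum p r (s+1) (List.zipWith (fun x y => PySem.Int.mod (x + y) 1000000007) a' b' ++ a'.drop b'.length)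
          ≡ (if PySem.Int.mod s p = r then x else 0) + (if PySem.Int.mod s p = r then y else 0) +
              (bsum p r (s+1) a' + bsum p r (s+1) b') [ZMOD 1000000007] := Int.ModEq.add hx ht
        _ = ((if PySem.Int.mod s p = r then x else 0) + bsum p r (s+1) a') +
              ((if PySem.Int.mod s p = r then y else 0) + bsum p r (s+1) b') := by ring

theorem bsum_pvAdd (p r : Int) (a b : List Int) (s : Int) :
    Int.ModEq 1000000007 (bsum p r s (pvAdd a b)) (bsum p r s a + bsum p r s b) := by
  unfold pvAdd
  by_cases h : a.length < b.length
  · rw [if_pos h]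
    simp only [PySem.List.slice_from_natCast]
    have := bsum_core p r a b s (by omega)
    calc bsum p r s (List.zipWith (fun x y => PySem.Int.mod (x + y) 1000000007) b a ++ b.drop a.length)
        ≡ bsum p r s b + bsum p r s a [ZMOD 1000000007] := this
      _ = bsum p r s a + bsum p r s b := by ring
  · rw [if_neg h]
    simp only [PySem.List.slice_from_natCast]
    exact bsum_core p r b a s (by omega)

-- the central fact: bucketing Q's exact-area coefficients gives A's table F
theorem Q_bsum (P : Nat) (hP : 1 ≤ P) : ∀ (i j : Nat) (r : Int), 0 ≤ r → r < (P:Int) →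
    (bsum (P:Int) r 0 (Q i j)) % 1000000007 = F (P:Int) i j r := by
  have hPpos : (0:Int) < (P:Int) := by omega
  intro i
  induction i with
  | zero =>
    intro j r hr0 hrP
    rw [show Q 0 j = [1] from by cases j <;> simp [Q], F_base _ _ _ _ (Or.inl rfl)]
    have : PySem.Int.mod 0 (P:Int) = 0 := by
      rw [PySem.Int.mod_eq_emod_of_pos hPpos]; simp
    simp only [bsum, this, add_zero]
    by_cases h : r = 0
    · subst h; norm_num
    · rw [if_neg (by omega), if_neg h]; norm_num
  | succ i ihi =>
    intro j
    induction j with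
    | zero =>
      intro r hr0 hrP
      rw [show Q (i+1) 0 = [1] from by simp [Q], F_base _ _ _ _ (Or.inr rfl)]
      have : PySem.Int.mod 0 (P:Int) = 0 := by
        rw [PySem.Int.mod_eq_emod_of_pos hPpos]; simp
      simp only [bsum, this, add_zero]
      by_cases h : r = 0
      · subst h; norm_num
      · rw [if_neg (by omega), if_neg h]; norm_num
    | succ j ihj =>
      intro r hr0 hrP
      rw [show Q (i+1) (j+1) = pvAdd (Q (i+1) j) (List.replicate (j+1) 0 ++ Q i (j+1)) from by
        simp [Q]]
      have hsh : bsum (P:Int) r 0 (List.replicate (j+1) 0 ++ Q i (j+1))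
          = bsum (P:Int) (PySem.Int.mod (r - ((j:Int)+1)) (P:Int)) 0 (Q i (j+1)) := by
        rw [bsum_append, bsum_zeros, List.length_replicate, zero_add, zero_add,
          bsum_shift (P:Int) r hPpos hr0 hrP ((j:Int)+1)]
        norm_num
      have hmem := bsum_pvAdd (P:Int) r (Q (i+1) j) (List.replicate (j+1) 0 ++ Q i (j+1)) 0
      have hres0 : 0 ≤ PySem.Int.mod (r - ((j:Int)+1)) (P:Int) := PySem.Int.mod_nonneg _ hPpos
      have hresP : PySem.Int.mod (r - ((j:Int)+1)) (P:Int) < (P:Int) := PySem.Int.mod_lt _ hPpos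
      have h1 := ihi (j+1) (PySem.Int.mod (r - ((j:Int)+1)) (P:Int)) hres0 hresP
      have h2 := ihj r hr0 hrP
      have hF : F (P:Int) (i+1) (j+1) r = PySem.Int.mod
          (F (P:Int) (i+1) j r +
            F (P:Int) i (j+1) (PySem.Int.mod (r - ((j:Int)+1)) (P:Int))) 1000000007 := by
        have := F_succ (P:Int) (i+1) (j+1) r (by omega) (by omega)
        simpa using this
      rw [hF, modL_eq_emod, ← h1, ← h2, Int.add_emod]
      have : bsum (P:Int) r 0 (pvAdd (Q (i+1) j) (List.replicate (j+1) 0 ++ Q i (j+1))) % 1000000007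
          = (bsum (P:Int) r 0 (Q (i+1) j) + bsum (P:Int) r 0 (List.replicate (j+1) 0 ++ Q i (j+1))) % 1000000007 :=
        hmem
      rw [this, hsh, Int.add_emod]
      rw [Int.emod_emod_of_dvd _ dvd_rfl, Int.emod_emod_of_dvd _ dvd_rfl]

theorem getD_map_range {α : Type} (f : Nat → α) (n k : Nat) (d : α) (hk : k < n) :
    ((List.range n).map f).getD k d = f k := by
  rw [List.getD_eq_getElem?_getD, List.getElem?_map, List.getElem?_range hk]
  rfl

theorem innerB (M : Nat) (K : Nat) (poly : List (List Int))
    (hpoly : poly = (List.range (M+1)).map (Q K)) (J : Nat) (hJ : J ≤ M) :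
    (PySem.List.pyRange 1 ((J:Int)+1) 1).foldl (fun new j =>
        new ++ [pvAdd (PySem.List.pyGetD new (j-1) [])
                      (PySem.List.pyRepeat [(0:Int)] j ++ PySem.List.pyGetD poly j [])])
      [[(1:Int)]]
    = (List.range (J+1)).map (Q (K+1)) := by
  induction J with
  | zero =>
    rw [show ((0:Nat):Int) + 1 = (1:Int) by norm_num,
      PySem.List.pyRange_one_eq_nil (le_refl 1), List.foldl_nil]
    simp [List.range_succ, Q]
  | succ J ih =>
    rw [show ((J+1 : Nat) : Int) + 1 = ((J:Int)+1) + 1 by push_cast; ring,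
      PySem.List.pyRange_one_succ_right (show (1:Int) ≤ (J:Int)+1 by omega),
      List.foldl_append, List.foldl_cons, List.foldl_nil, ih (by omega)]
    have hget1 : PySem.List.pyGetD ((List.range (J+1)).map (Q (K+1))) ((J:Int)+1-1) []
        = Q (K+1) J := by
      rw [show ((J:Int)+1-1) = ((J:Nat):Int) by ring, PySem.List.pyGetD_natCast]
      exact getD_map_range _ _ _ _ (by omega)
    have hget2 : PySem.List.pyGetD poly ((J:Int)+1) [] = Q K (J+1) := by
      rw [hpoly, show ((J:Int)+1) = ((J+1 : Nat) : Int) by push_cast; ring,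
        PySem.List.pyGetD_natCast]
      exact getD_map_range _ _ _ _ (by omega)
    rw [hget1, hget2, PySem.List.pyRepeat_singleton,
      show (((J:Int)+1)).toNat = J+1 from by omega]
    rw [show (List.range (J+1+1)).map (Q (K+1))
        = (List.range (J+1)).map (Q (K+1)) ++ [Q (K+1) (J+1)] from by
      rw [List.range_succ, List.map_append]; rfl]
    congr 1
    rw [show Q (K+1) (J+1) = pvAdd (Q (K+1) J) (List.replicate (J+1) 0 ++ Q K (J+1)) from by
      simp [Q]]

theorem outerB (M : Nat) (n : Int) (hn : 0 ≤ n) :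
    (PySem.List.pyRange 0 n 1).foldl (fun poly _ =>
      (PySem.List.pyRange 1 ((M:Int)+1) 1).foldl (fun new j =>
        new ++ [pvAdd (PySem.List.pyGetD new (j-1) [])
                      (PySem.List.pyRepeat [(0:Int)] j ++ PySem.List.pyGetD poly j [])])
        [[(1:Int)]])
      ((PySem.List.pyRange 0 ((M:Int)+1) 1).map (fun _ => [(1:Int)]))
    = (List.range (M+1)).map (Q n.toNat) := by
  obtain ⟨N, rfl⟩ : ∃ N : Nat, n = (N:Int) := ⟨n.toNat, by omega⟩
  rw [Int.toNat_natCast]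
  induction N with
  | zero =>
    rw [Nat.cast_zero, PySem.List.pyRange_one_eq_nil (le_refl 0), List.foldl_nil]
    rw [List.map_const', PySem.List.length_pyRange_one,
      show (((M:Int)+1) - 0).toNat = M+1 from by omega]
    apply List.ext_getElem (by simp)
    intro k h1 h2
    simp only [List.getElem_replicate, List.getElem_map, List.getElem_range]
    rw [show Q 0 k = [1] from by cases k <;> simp [Q]]
  | succ N ih =>
    rw [show ((N+1 : Nat) : Int) = (N:Int) + 1 by push_cast; ring,
      PySem.List.pyRange_one_succ_right (a := 0) (b := (N:Int)) (by omega),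
      List.foldl_append, List.foldl_cons, List.foldl_nil, ih (by omega)]
    exact innerB M N ((List.range (M+1)).map (Q N)) rfl M (le_refl M)

-- the bucketing loop
theorem bucketLoop (P : Nat) (hP : 1 ≤ P) (p : Int) (hp : p = (P:Int)) (l : List Int) :
    ∀ (s : Int), 0 ≤ s → ∀ (g : Int → Int) (buckets : List Int),
    buckets.length = P →
    (∀ r : Int, 0 ≤ r → r < p → buckets.getD r.toNat 0 = PySem.Int.mod (g r) 1000000007) →
    ((PySem.List.enumerate l s).foldl
      (fun buckets ec =>
        PySem.List.pySetD buckets (PySem.Int.mod ec.1 p)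
          (PySem.Int.mod (PySem.List.pyGetD buckets (PySem.Int.mod ec.1 p) 0 + ec.2) 1000000007))
      buckets).length = P ∧
    ∀ r : Int, 0 ≤ r → r < p →
      ((PySem.List.enumerate l s).foldl
        (fun buckets ec =>
          PySem.List.pySetD buckets (PySem.Int.mod ec.1 p)
            (PySem.Int.mod (PySem.List.pyGetD buckets (PySem.Int.mod ec.1 p) 0 + ec.2) 1000000007))
        buckets).getD r.toNat 0 = PySem.Int.mod (g r + bsum p r s l) 1000000007 := by
  subst hp
  have hPpos : (0:Int) < (P:Int) := by omega
  induction l with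
  | nil =>
    intro s _ g buckets hlen hb
    rw [PySem.List.enumerate_nil]
    exact ⟨hlen, fun r hr0 hrP => by
      simp only [List.foldl_nil, bsum, add_zero]
      exact hb r hr0 hrP⟩
  | cons c t ih =>
    intro s hs g buckets hlen hb
    rw [PySem.List.enumerate_cons, List.foldl_cons]
    set u := PySem.Int.mod s (P:Int) with hu
    have hu0 : 0 ≤ u := PySem.Int.mod_nonneg _ hPpos
    have huP : u < (P:Int) := PySem.Int.mod_lt _ hPpos
    have hsetD : PySem.List.pySetD buckets u
        (PySem.Int.mod (PySem.List.pyGetD buckets u 0 + c) 1000000007)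
        = buckets.set u.toNat (PySem.Int.mod (g u + c) 1000000007) := by
      rw [PySem.List.pySetD_of_nonneg _ _ hu0]
      congr 1
      rw [show PySem.List.pyGetD buckets u 0 = buckets.getD u.toNat 0 from by
          conv_lhs => rw [show u = ((u.toNat : Nat) : Int) from by omega]
          rw [PySem.List.pyGetD_natCast],
        hb u hu0 huP, modL_addl]
    rw [hsetD]
    have := ih (s+1) (by omega) (Function.update g u (g u + c))
      (buckets.set u.toNat (PySem.Int.mod (g u + c) 1000000007))
      (by rw [List.length_set]; exact hlen)
      (by
        intro r hr0 hrP
        rw [getD_set _ u.toNat r.toNat _ _ (by omega)]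
        by_cases h : r = u
        · subst h; rw [if_pos rfl, Function.update_self]
        · rw [if_neg (by omega), Function.update_of_ne h]
          exact hb r hr0 hrP)
    refine ⟨this.1, ?_⟩
    intro r hr0 hrP
    rw [this.2 r hr0 hrP]
    simp only [bsum, ← hu]
    by_cases h : r = u
    · subst h
      rw [Function.update_self, if_pos rfl]
      congr 1; ring
    · rw [Function.update_of_ne h, if_neg (fun hh => h hh.symm)]
      congr 1; ring

theorem dpB_eq_F (N M P : Nat) (hP : 1 ≤ P) (r : Int) (hr1 : -(P:Int) ≤ r) (hr2 : r < (P:Int)) :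
    dp_alt (N:Int) (M:Int) (P:Int) r = F (P:Int) N M (PySem.Int.mod r (P:Int)) := by
  have hPpos : (0:Int) < (P:Int) := by omega
  simp only [dp_alt]
  rw [outerB M (N:Int) (by omega), Int.toNat_natCast]
  have hgetm : PySem.List.pyGetD ((List.range (M+1)).map (Q N)) ((M:Nat):Int) [] = Q N M := by
    rw [PySem.List.pyGetD_natCast]
    exact getD_map_range _ _ _ _ (by omega)
  rw [hgetm, PySem.List.pyRepeat_singleton, show (((P:Nat):Int)).toNat = P from by omega]
  obtain ⟨hlen, hval⟩ := bucketLoop P hP (P:Int) rfl (Q N M) 0 (le_refl 0)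
    (fun _ => 0) (List.replicate P 0) (by simp)
    (by
      intro ρ h0 hP'
      rw [List.getD_eq_getElem?_getD, List.getElem?_replicate, if_pos (by omega)]
      rw [modL_eq_emod]; rfl)
  have hres : ∀ ρ : Int, 0 ≤ ρ → ρ < (P:Int) →
      ((PySem.List.enumerate (Q N M) 0).foldl
        (fun buckets ec =>
          PySem.List.pySetD buckets (PySem.Int.mod ec.1 (P:Int))
            (PySem.Int.mod (PySem.List.pyGetD buckets (PySem.Int.mod ec.1 (P:Int)) 0 + ec.2) 1000000007))
        (List.replicate P 0)).getD ρ.toNat 0 = F (P:Int) N M ρ := by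
    intro ρ h0 hP'
    rw [hval ρ h0 hP', zero_add, modL_eq_emod]
    exact Q_bsum P hP N M ρ h0 hP'
  set res := (PySem.List.enumerate (Q N M) 0).foldl
    (fun buckets ec =>
      PySem.List.pySetD buckets (PySem.Int.mod ec.1 (P:Int))
        (PySem.Int.mod (PySem.List.pyGetD buckets (PySem.Int.mod ec.1 (P:Int)) 0 + ec.2) 1000000007))
    (List.replicate P 0) with hresdef
  rcases le_or_gt 0 r with hr0 | hr0
  · have hmod : PySem.Int.mod r (P:Int) = r := by
      rw [PySem.Int.mod_eq_emod_of_pos hPpos]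
      exact Int.emod_eq_of_lt hr0 hr2
    rw [hmod, show r = ((r.toNat : Nat) : Int) from by omega, PySem.List.pyGetD_natCast]
    have := hres ((r.toNat : Nat) : Int) (by omega) (by omega)
    rw [Int.toNat_natCast] at this
    exact this
  · have hk1 : 0 < (-r).toNat := by omega
    have hmod : PySem.Int.mod r (P:Int) = ((P - (-r).toNat : Nat) : Int) := by
      rw [PySem.Int.mod_eq_emod_of_pos hPpos,
        show r % (P:Int) = (r + (P:Int)*1) % (P:Int) from (Int.add_mul_emod_self_left r (P:Int) 1).symm,
        mul_one, Int.emod_eq_of_lt (by omega) (by omega)]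
      omega
    rw [hmod]
    conv_lhs => rw [show r = -(((-r).toNat : Nat) : Int) from by omega]
    rw [pyGetD_neg_getD _ _ hk1 (by omega), hlen]
    have := hres ((P - (-r).toNat : Nat) : Int) (by omega) (by omega)
    rw [Int.toNat_natCast] at this
    exact this

-- ===== VERDICT (by name: the statement is the Claim_ definition above) =====
theorem dp_spec : Claim_equal_dp := by
  intro n m p r hdom hpre
  unfold Spec_dp
  obtain ⟨hn, hm, hp, hr1, hr2⟩ := hpre
  rw [show n = ((n.toNat : Nat) : Int) from (Int.toNat_of_nonneg hn).symm,
      show m = ((m.toNat : Nat) : Int) from (Int.toNat_of_nonneg hm).symm,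
      show p = ((p.toNat : Nat) : Int) from (Int.toNat_of_nonneg (by omega)).symm,
      dpA_eq_F n.toNat m.toNat p.toNat (by omega) r (by omega) (by omega),
      dpB_eq_F n.toNat m.toNat p.toNat (by omega) r (by omega) (by omega)]
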